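-- pv_equiv track=rewrite | github.com/pray92/Practice | VSCode/Python/Programmers/candidate_key.py | can_be_candidated
-- ===== SOURCE A (Python) =====
-- def can_be_candidated(sub_relation):
-- 	candidates = {}
-- 	for keys in sub_relation:
-- 		try:
-- 			candidates[tuple(keys)] += 1
-- 		except:
-- 			candidates[tuple(keys)] = 1
-- 			continue
-- 		return False
-- 	return True
-- ===== SOURCE B (Python) =====
-- def can_be_candidated(sub_relation):
--     rows = list(sub_relation)
--     if not rows:
--         return True
--     head, rest = rows[0], rows[1:]
--     return head not in rest and can_be_candidated(rest)
-- ===== Notes on version B (the rewrite author's own statement) =====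
-- stated objective: alternative
-- what changed: Replaces A's hash-dict with try/except-driven early return by a hashing-free structural recursion: peel off the first row, compare it against every remaining row by a linear membership scan, and recurse on the tail.
import Mathlib
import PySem

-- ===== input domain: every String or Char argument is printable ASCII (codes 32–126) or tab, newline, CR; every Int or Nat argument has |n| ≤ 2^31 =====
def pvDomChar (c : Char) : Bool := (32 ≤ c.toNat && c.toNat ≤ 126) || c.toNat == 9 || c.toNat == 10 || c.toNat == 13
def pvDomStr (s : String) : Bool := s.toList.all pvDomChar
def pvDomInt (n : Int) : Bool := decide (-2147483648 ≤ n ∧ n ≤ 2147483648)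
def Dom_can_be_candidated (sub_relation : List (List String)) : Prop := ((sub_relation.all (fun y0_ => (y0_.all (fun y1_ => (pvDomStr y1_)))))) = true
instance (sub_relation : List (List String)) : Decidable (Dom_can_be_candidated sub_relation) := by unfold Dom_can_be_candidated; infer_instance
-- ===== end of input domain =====

-- B replaces A's hash-dict with try/except-driven early return by a hashing-free
-- structural recursion: first row checked against the rest by a linear scan, recurse
-- on the tail (alternative decomposition, quadratic instead of hashing).

-- ===== PORT A =====
-- the for-loop over sub_relation with the dict 'candidates'; 'candidates[t] += 1'
-- succeeds exactly when t is already a key, and then the loop body falls through to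
-- 'return False'; on KeyError the except arm inserts 1 and continues.
def canBeCandidatedLoopA (candidates : PySem.Dict (List String) Int)
    (rows : List (List String)) : Bool :=
  match rows with
  | [] => true
  | keys :: rest =>
    match candidates.get? keys with
    | some v =>
      -- 'candidates[tuple(keys)] += 1' succeeded, then 'return False'
      let _ := candidates.insert keys (v + 1)
      false
    | none => canBeCandidatedLoopA (candidates.insert keys 1) rest

def can_be_candidated (sub_relation : List (List String)) : Bool :=
  canBeCandidatedLoopA PySem.Dict.empty sub_relation

-- ===== PORT B =====
-- 'rows = list(sub_relation); if not rows: return True;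
--  head, rest = rows[0], rows[1:]; return head not in rest and can_be_candidated(rest)'
def can_be_candidated_alt (sub_relation : List (List String)) : Bool :=
  match sub_relation with
  | [] => true
  | head :: rest => !(rest.contains head) && can_be_candidated_alt rest

-- ===== PRECONDITION & SPEC =====
def Spec_can_be_candidated (sub_relation : List (List String)) (out : Bool) : Prop := out = can_be_candidated_alt sub_relation
instance (sub_relation : List (List String)) (out : Bool) : Decidable (Spec_can_be_candidated sub_relation out) := by unfold Spec_can_be_candidated; infer_instance

-- ===== CLAIM =====
def Claim_equal_can_be_candidated : Prop := ∀ (sub_relation : List (List String)), Dom_can_be_candidated sub_relation → Spec_can_be_candidated sub_relation (can_be_candidated sub_relation)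

-- ===== LEMMAS AND PROOFS =====

-- A's loop from dict d succeeds iff no row is a key of d and B's recursion accepts the rows
lemma loopA_char (rows : List (List String)) (d : PySem.Dict (List String) Int) :
    canBeCandidatedLoopA d rows =
      (rows.all (fun k => (d.get? k).isNone) && can_be_candidated_alt rows) := by
  induction rows generalizing d with
  | nil => simp [canBeCandidatedLoopA, can_be_candidated_alt]
  | cons k rest ih =>
    simp only [canBeCandidatedLoopA, can_be_candidated_alt]
    cases hget : d.get? k with
    | some v => simp [hget]
    | none =>
      rw [ih]
      simp only [List.all_cons, hget, Option.isNone_none, Bool.true_and]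
      rw [Bool.eq_iff_iff]
      simp only [List.all_eq_true, List.contains_eq_mem, Bool.and_eq_true, Bool.not_eq_true',
        decide_eq_false_iff_not, Option.isNone_iff_eq_none]
      constructor
      · rintro ⟨h1, h2⟩
        refine ⟨fun x hx => ?_, fun hk => ?_, h2⟩
        · have := h1 x hx
          rw [PySem.Dict.get?_insert] at this
          split at this
          · exact absurd this (by simp)
          · exact this
        · have := h1 k hk
          rw [PySem.Dict.get?_insert_self] at this
          exact absurd this (by simp)
      · rintro ⟨h1, h2, h3⟩
        refine ⟨fun x hx => ?_, h3⟩
        rw [PySem.Dict.get?_insert]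
        split
        · exact absurd (‹x = k› ▸ hx) h2
        · exact h1 x hx

-- ===== VERDICT =====
theorem can_be_candidated_spec : Claim_equal_can_be_candidated := by
  intro xs _
  unfold Spec_can_be_candidated can_be_candidated
  rw [loopA_char]
  simp [PySem.Dict.get?_empty]
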